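-- pv_equiv track=rewrite | github.com/KunalBurangi/code-review-graph-v2 | src/code_review_graph_v2/v2/parser.py | _find_block_end_indent
-- ===== SOURCE A (Python) =====
-- def _find_block_end_indent(lines: list[str], start_idx: int) -> int:
--     """Find end of an indentation-based block (Python, Ruby).
--
--     Scans forward from the definition line until we hit a non-empty line
--     at the same or lower indentation level.
--     """
--     if start_idx >= len(lines):
--         return start_idx
--
--     def_line = lines[start_idx]
--     # measure leading whitespace of the definition line itself
--     def_indent = len(def_line) - len(def_line.lstrip())
--
--     last_body_idx = start_idx  # fallback: at least the definition line
--
--     for idx in range(start_idx + 1, len(lines)):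
--         line = lines[idx]
--         stripped = line.strip()
--
--         # skip blank lines and comments – they don't end blocks
--         if not stripped or stripped.startswith("#"):
--             continue
--
--         line_indent = len(line) - len(line.lstrip())
--         if line_indent <= def_indent:
--             # This line is at the same or lower indentation → block ended
--             break
--         last_body_idx = idx
--
--     return last_body_idx
-- ===== SOURCE B (Python) =====
-- def _is_code(line: str) -> bool:
--     s = line.strip()
--     return bool(s) and not s.startswith("#")
--
--
-- def _find_block_end_indent(lines: list[str], start_idx: int) -> int:
--     """Two-pass version: find the block's end boundary going forward, then the
--     last body line going backward from it."""
--     n = len(lines)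
--     if start_idx >= n:
--         return start_idx
--
--     def_line = lines[start_idx]
--     def_indent = len(def_line) - len(def_line.lstrip())
--
--     # forward: first code line at indent <= def_indent ends the block
--     boundary = n
--     for i in range(start_idx + 1, n):
--         if _is_code(lines[i]) and len(lines[i]) - len(lines[i].lstrip()) <= def_indent:
--             boundary = i
--             break
--
--     # backward: last code line strictly inside the block
--     for i in range(boundary - 1, start_idx, -1):
--         if _is_code(lines[i]):
--             return i
--     return start_idx
-- ===== Notes on version B (the rewrite author's own statement) =====
-- stated objective: alternative
-- what changed: Replaces A's single forward scan that carries a last_body_idx accumulator with a two-pass decomposition: a forward scan that only locates the block's end boundary (first code line at indent <= def_indent, default len(lines)), then a backward scan from the boundary returning the first code line, falling back to start_idx.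
import Mathlib
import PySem

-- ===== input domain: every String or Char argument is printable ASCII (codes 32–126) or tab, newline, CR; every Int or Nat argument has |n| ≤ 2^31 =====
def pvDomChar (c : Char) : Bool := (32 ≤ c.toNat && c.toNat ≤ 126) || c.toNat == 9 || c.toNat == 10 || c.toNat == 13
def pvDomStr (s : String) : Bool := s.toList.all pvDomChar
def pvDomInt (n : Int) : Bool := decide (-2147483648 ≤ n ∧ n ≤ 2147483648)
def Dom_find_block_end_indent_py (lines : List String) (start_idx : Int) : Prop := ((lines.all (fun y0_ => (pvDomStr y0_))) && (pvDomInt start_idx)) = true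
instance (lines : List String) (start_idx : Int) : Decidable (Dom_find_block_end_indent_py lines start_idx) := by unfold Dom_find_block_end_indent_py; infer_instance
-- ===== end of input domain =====

-- B restructures A's single accumulator scan into a forward boundary search plus a backward
-- scan for the last body line (objective: alternative decomposition, same cost).

-- ===== PORT A =====
def find_block_end_indent_py_loop (lines : List String) (def_indent : Int) :
    List Int → Int → Int
  | [], last_body_idx => last_body_idx
  | idx :: rest, last_body_idx =>
      let line := PySem.List.pyGetD lines idx ""
      let stripped := PySem.Str.strip line
      if stripped == "" || PySem.Str.startswith stripped "#" then
        find_block_end_indent_py_loop lines def_indent rest last_body_idx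
      else if PySem.Str.len line - PySem.Str.len (PySem.Str.lstrip line) ≤ def_indent then
        last_body_idx
      else
        find_block_end_indent_py_loop lines def_indent rest idx

def find_block_end_indent_py (lines : List String) (start_idx : Int) : Int :=
  if start_idx ≥ PySem.List.len lines then start_idx
  else
    let def_line := PySem.List.pyGetD lines start_idx ""
    let def_indent := PySem.Str.len def_line - PySem.Str.len (PySem.Str.lstrip def_line)
    find_block_end_indent_py_loop lines def_indent
      (PySem.List.pyRange (start_idx + 1) (PySem.List.len lines) 1) start_idx

-- ===== PORT B =====
def pvIsCode (line : String) : Bool :=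
  let s := PySem.Str.strip line
  !(s == "") && !(PySem.Str.startswith s "#")

def pvIndent (line : String) : Int :=
  PySem.Str.len line - PySem.Str.len (PySem.Str.lstrip line)

def pvEnds (lines : List String) (d i : Int) : Bool :=
  pvIsCode (PySem.List.pyGetD lines i "") && decide (pvIndent (PySem.List.pyGetD lines i "") ≤ d)

def find_block_end_indent_py_alt (lines : List String) (start_idx : Int) : Int :=
  let n := PySem.List.len lines
  if start_idx ≥ n then start_idx
  else
    let def_line := PySem.List.pyGetD lines start_idx ""
    let d := pvIndent def_line
    let boundary := ((PySem.List.pyRange (start_idx + 1) n 1).find? (pvEnds lines d)).getD n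
    (((PySem.List.pyRange (boundary - 1) start_idx (-1)).find?
        (fun i => pvIsCode (PySem.List.pyGetD lines i ""))).getD start_idx)

-- ===== PRECONDITION & SPEC =====
-- Pre_ excludes exactly the inputs where Python's lines[start_idx] raises IndexError:
-- start_idx < -len(lines) (and start_idx < len(lines)).
def Pre_find_block_end_indent_py (lines : List String) (start_idx : Int) : Prop :=
  -(lines.length : Int) ≤ start_idx ∨ (lines.length : Int) ≤ start_idx
instance (lines : List String) (start_idx : Int) : Decidable (Pre_find_block_end_indent_py lines start_idx) := by unfold Pre_find_block_end_indent_py; infer_instance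

def pvWitness_find_block_end_indent_py : List String × Int := (["def f():", "    x=1"], 0)

def Spec_find_block_end_indent_py (lines : List String) (start_idx : Int) (out : Int) : Prop := out = find_block_end_indent_py_alt lines start_idx
instance (lines : List String) (start_idx : Int) (out : Int) : Decidable (Spec_find_block_end_indent_py lines start_idx out) := by unfold Spec_find_block_end_indent_py; infer_instance

-- ===== CLAIM (what is proved, stated in full; the proofs are below) =====
def Claim_equal_find_block_end_indent_py : Prop := ∀ (lines : List String) (start_idx : Int), Dom_find_block_end_indent_py lines start_idx → Pre_find_block_end_indent_py lines start_idx → Spec_find_block_end_indent_py lines start_idx (find_block_end_indent_py lines start_idx)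

-- ===== LEMMAS AND PROOFS =====

-- splitting the countdown range at its last element
lemma pvRange_neg_split (a m : Int) (h : a ≤ m - 1) :
    PySem.List.pyRange (m - 1) (a - 1) (-1) = PySem.List.pyRange (m - 1) a (-1) ++ [a] := by
  have h1 : PySem.List.pyRange (m - 1) (a - 1) (-1) = (PySem.List.pyRange a m 1).reverse := by
    rw [PySem.List.pyRange_neg_one_eq_reverse]; norm_num
  have h2 : PySem.List.pyRange (m - 1) a (-1) = (PySem.List.pyRange (a + 1) m 1).reverse := by
    rw [PySem.List.pyRange_neg_one_eq_reverse]; norm_num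
  rw [h1, h2, PySem.List.pyRange_one_cons (by omega)]
  simp

-- core bridge: A's accumulator loop over range(a, b) equals B's boundary-then-backward scan
lemma pv_main (lines : List String) (d : Int) :
    ∀ (k : Nat) (a b last : Int), (b - a).toNat = k → a ≤ b →
      find_block_end_indent_py_loop lines d (PySem.List.pyRange a b 1) last =
        (((PySem.List.pyRange
              ((((PySem.List.pyRange a b 1).find? (pvEnds lines d)).getD b) - 1)
              (a - 1) (-1)).find?
            (fun i => pvIsCode (PySem.List.pyGetD lines i ""))).getD last) := by
  intro k
  induction k with
  | zero =>
      intro a b last hk hab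
      have hba : b = a := by omega
      subst hba
      rw [PySem.List.pyRange_one_eq_nil le_rfl]
      simp [find_block_end_indent_py_loop,
        PySem.List.pyRange_neg_one_eq_nil (by omega : b - 1 ≤ b - 1)]
  | succ k ih =>
      intro a b last hk hab
      have hlt : a < b := by omega
      rw [PySem.List.pyRange_one_cons hlt]
      set line := PySem.List.pyGetD lines a "" with hline
      by_cases hskip : (PySem.Str.strip line == "" || PySem.Str.startswith (PySem.Str.strip line) "#") = true
      · -- blank or comment line: both passes ignore index a
        have hcode : pvIsCode line = false := by
          unfold pvIsCode
          rcases (Bool.or_eq_true _ _).mp hskip with h | h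
          · simp only [h, Bool.not_true, Bool.false_and]
          · simp only [h, Bool.not_true, Bool.and_false]
        have hends : pvEnds lines d a = false := by
          simp [pvEnds, ← hline, hcode]
        have hloop : find_block_end_indent_py_loop lines d
            (a :: PySem.List.pyRange (a + 1) b 1) last =
            find_block_end_indent_py_loop lines d (PySem.List.pyRange (a + 1) b 1) last := by
          simp only [find_block_end_indent_py_loop, ← hline, hskip]
          simp
        rw [hloop, ih (a + 1) b last (by omega) (by omega)]
        simp only [add_sub_cancel_right]
        rw [List.find?_cons_of_neg (by simp [hends])]
        set m := ((PySem.List.pyRange (a + 1) b 1).find? (pvEnds lines d)).getD b with hm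
        have hma : a + 1 ≤ m := by
          rcases hfind : (PySem.List.pyRange (a + 1) b 1).find? (pvEnds lines d) with _ | j
          · simp [hm, hfind]; omega
          · have := List.mem_of_find?_eq_some hfind
            have := (PySem.List.mem_pyRange_one).mp this
            simp [hm, hfind]; omega
        rw [pvRange_neg_split a m (by omega), List.find?_append]
        have : (List.find? (fun i => pvIsCode (PySem.List.pyGetD lines i "")) [a]) = none := by
          simp [← hline, hcode]
        rw [this]
        cases List.find? (fun i => pvIsCode (PySem.List.pyGetD lines i ""))
            (PySem.List.pyRange (m - 1) a (-1)) <;> simp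
      · -- code line
        have hcode : pvIsCode line = true := by
          unfold pvIsCode
          simp only [Bool.or_eq_true, not_or, Bool.not_eq_true] at hskip
          simp only [hskip.1, hskip.2, Bool.not_false, Bool.and_self]
        by_cases hind : pvIndent line ≤ d
        · -- boundary found at a: A stops with last, B's backward range is empty
          have hends : pvEnds lines d a = true := by
            simp [pvEnds, ← hline, hcode, hind]
          have hloop : find_block_end_indent_py_loop lines d
              (a :: PySem.List.pyRange (a + 1) b 1) last = last := by
            simp only [find_block_end_indent_py_loop, ← hline]
            rw [if_neg (by simp_all), if_pos (by simpa [pvIndent] using hind)]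
          rw [hloop, List.find?_cons_of_pos hends]
          simp [PySem.List.pyRange_neg_one_eq_nil (by omega : a - 1 ≤ a - 1)]
        · -- body line: A updates the accumulator to a, B's backward scan reaches a last
          have hends : pvEnds lines d a = false := by
            simp [pvEnds, ← hline, hcode, hind]
          have hloop : find_block_end_indent_py_loop lines d
              (a :: PySem.List.pyRange (a + 1) b 1) last =
              find_block_end_indent_py_loop lines d (PySem.List.pyRange (a + 1) b 1) a := by
            simp only [find_block_end_indent_py_loop, ← hline]
            rw [if_neg (by simp_all), if_neg (by simpa [pvIndent] using hind)]
          rw [hloop, ih (a + 1) b a (by omega) (by omega)]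
          simp only [add_sub_cancel_right]
          rw [List.find?_cons_of_neg (by simp [hends])]
          set m := ((PySem.List.pyRange (a + 1) b 1).find? (pvEnds lines d)).getD b with hm
          have hma : a + 1 ≤ m := by
            rcases hfind : (PySem.List.pyRange (a + 1) b 1).find? (pvEnds lines d) with _ | j
            · simp [hm, hfind]; omega
            · have := List.mem_of_find?_eq_some hfind
              have := (PySem.List.mem_pyRange_one).mp this
              simp [hm, hfind]; omega
          rw [pvRange_neg_split a m (by omega), List.find?_append]
          have : (List.find? (fun i => pvIsCode (PySem.List.pyGetD lines i "")) [a]) = some a := by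
            simp [← hline, hcode]
          rw [this]
          cases List.find? (fun i => pvIsCode (PySem.List.pyGetD lines i ""))
              (PySem.List.pyRange (m - 1) a (-1)) <;> simp

-- ===== VERDICT (by name: the statement is the Claim_ definition above) =====
theorem find_block_end_indent_py_spec : Claim_equal_find_block_end_indent_py := by
  intro lines start_idx _ _
  unfold Spec_find_block_end_indent_py find_block_end_indent_py find_block_end_indent_py_alt
  by_cases h : start_idx ≥ PySem.List.len lines
  · rw [if_pos h, if_pos h]
  · rw [if_neg h, if_neg h]
    have hab : start_idx + 1 ≤ PySem.List.len lines := by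
      simp only [PySem.List.len_eq] at h ⊢; omega
    have := pv_main lines
      (PySem.Str.len (PySem.List.pyGetD lines start_idx "") -
        PySem.Str.len (PySem.Str.lstrip (PySem.List.pyGetD lines start_idx "")))
      ((PySem.List.len lines - (start_idx + 1)).toNat) (start_idx + 1)
      (PySem.List.len lines) start_idx rfl hab
    simpa [pvIndent] using this
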